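-- pv_equiv track=rewrite | github.com/eduardocorona17/isitworking | vs.py | modify_palindrome
-- ===== SOURCE A (Python) =====
-- def modify_palindrome(s):
--     if s == s[::-1]:
--         for i in range(len(s)):
--             for j in range(97, ord(s[i])):
--                 t = s[:i] + chr(j) + s[i+1:]
--                 if t < s and t == t[::-1]:
--                     return t
--     else:
--         for i in range(len(s)):
--             for j in range(97, 123):
--                 t = s[:i] + chr(j) + s[i+1:]
--                 if t < s and t == t[::-1]:
--                     return t
--     return ''
-- ===== SOURCE B (Python) =====
-- def modify_palindrome(s):
--     # O(n) analysis: only the centre position (when s is a palindrome of odd length)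
--     # or one of the two positions of a unique mismatched pair can be edited.
--     n = len(s)
--     mism = [i for i in range(n // 2) if s[i] != s[n - 1 - i]]
--     if not mism:
--         m = n // 2
--         if n % 2 == 1 and s[m] > 'a':
--             return s[:m] + 'a' + s[m + 1:]
--         return ''
--     if len(mism) == 1:
--         p = mism[0]
--         q = n - 1 - p
--         if s[q] < s[p] and 'a' <= s[q] <= 'z':
--             return s[:p] + s[q] + s[p + 1:]
--         if s[p] < s[q] and 'a' <= s[p] <= 'z':
--             return s[:q] + s[p] + s[q + 1:]
--     return ''
-- ===== Notes on version B (the rewrite author's own statement) =====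
-- stated objective: faster
-- what changed: Replaced A's brute-force scan over all positions and all candidate letters (rebuilding and re-checking a candidate string each time) with a single pass that finds the mismatched mirror pairs and derives the unique possible edit in closed form: the centre letter of an odd-length palindrome is replaced by the smallest lowercase letter, or the larger letter of a lone mismatched pair is lowered to its mirror image.
import Mathlib
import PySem

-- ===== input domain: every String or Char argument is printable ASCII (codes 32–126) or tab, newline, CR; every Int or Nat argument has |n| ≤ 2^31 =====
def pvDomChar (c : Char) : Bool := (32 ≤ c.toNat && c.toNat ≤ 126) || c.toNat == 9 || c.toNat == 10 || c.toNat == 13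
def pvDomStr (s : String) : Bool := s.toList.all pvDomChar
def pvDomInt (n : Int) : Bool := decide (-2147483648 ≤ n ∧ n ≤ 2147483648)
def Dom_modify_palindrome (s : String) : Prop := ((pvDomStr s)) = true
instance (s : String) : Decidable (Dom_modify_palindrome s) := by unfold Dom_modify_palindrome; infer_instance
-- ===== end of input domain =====

-- B replaces A's scan over every position and every candidate letter (each candidate string
-- rebuilt and re-checked) by one pass over the mirror pairs deriving the unique possible edit;
-- measurably faster (asymptotically fewer string rebuilds).

-- ===== PORT A =====
-- Python string `<` (lexicographic by code point)
def pvStrLt : List Char → List Char → Bool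
  | [], [] => false
  | [], _ :: _ => true
  | _ :: _, [] => false
  | a :: as, b :: bs => if a < b then true else if b < a then false else pvStrLt as bs

-- t = s[:i] + chr(j) + s[i+1:]
def pvRep (l : List Char) (i : Nat) (c : Char) : List Char :=
  l.take i ++ [c] ++ l.drop (i + 1)

-- `t < s and t == t[::-1]`
def pvCond (l : List Char) (i j : Nat) : Bool :=
  let t := pvRep l i (Char.ofNat j)
  pvStrLt t l && (t == t.reverse)

-- `for j in <js>: … if …: return t`
def pvInnerA (l : List Char) (i : Nat) : List Nat → Option (List Char)
  | [] => none
  | j :: js => if pvCond l i j then some (pvRep l i (Char.ofNat j)) else pvInnerA l i js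

-- palindrome branch: `for i in range(len(s)): for j in range(97, ord(s[i])): …`
def pvOuterPal (l : List Char) : List Nat → Option (List Char)
  | [] => none
  | i :: is =>
    match pvInnerA l i (List.range' 97 ((l.getD i default).toNat - 97)) with
    | some t => some t
    | none => pvOuterPal l is

-- other branch: `for i in range(len(s)): for j in range(97, 123): …`
def pvOuterNon (l : List Char) : List Nat → Option (List Char)
  | [] => none
  | i :: is =>
    match pvInnerA l i (List.range' 97 26) with
    | some t => some t
    | none => pvOuterNon l is

def modify_palindrome (s : String) : String :=
  let l := s.toList
  if l == l.reverse then
    match pvOuterPal l (List.range l.length) with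
    | some t => String.mk t
    | none => ""
  else
    match pvOuterNon l (List.range l.length) with
    | some t => String.mk t
    | none => ""

-- ===== PORT B =====
def modify_palindrome_alt (s : String) : String :=
  let l := s.toList
  let n := l.length
  let mism := (List.range (n / 2)).filter
    (fun i => !(l.getD i default == l.getD (n - 1 - i) default))
  match mism with
  | [] =>
    let m := n / 2
    if n % 2 = 1 ∧ 'a' < l.getD m default then
      String.mk (l.take m ++ ['a'] ++ l.drop (m + 1))
    else ""
  | [p] =>
    let q := n - 1 - p
    let cp := l.getD p default
    let cq := l.getD q default
    if cq < cp ∧ 'a' ≤ cq ∧ cq ≤ 'z' then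
      String.mk (l.take p ++ [cq] ++ l.drop (p + 1))
    else if cp < cq ∧ 'a' ≤ cp ∧ cp ≤ 'z' then
      String.mk (l.take q ++ [cp] ++ l.drop (q + 1))
    else ""
  | _ => ""

-- ===== PRECONDITION & SPEC =====
def Spec_modify_palindrome (s : String) (out : String) : Prop := out = modify_palindrome_alt s
instance (s : String) (out : String) : Decidable (Spec_modify_palindrome s out) := by unfold Spec_modify_palindrome; infer_instance

-- ===== CLAIM (what is proved, stated in full; the proofs are below) =====
def Claim_equal_modify_palindrome : Prop := ∀ (s : String), Dom_modify_palindrome s → Spec_modify_palindrome s (modify_palindrome s)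

-- ===== LEMMAS AND PROOFS =====

theorem pvCharLt (c c' : Char) : c < c' ↔ c.toNat < c'.toNat := by
  rw [Char.lt_def, UInt32.lt_iff_toNat_lt]; rfl

theorem pvCharLe (c c' : Char) : c ≤ c' ↔ c.toNat ≤ c'.toNat := by
  rw [Char.le_def, UInt32.le_iff_toNat_le]; rfl

theorem pvCharEq {c c' : Char} (h : c.toNat = c'.toNat) : c = c' := by
  apply Char.ext; exact UInt32.toNat_inj.mp h

theorem pvOfNat_toNat {j : Nat} (hv : j < 55296) : (Char.ofNat j).toNat = j := by
  rw [Char.ofNat, dif_pos (Or.inl hv)]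
  simp [Char.ofNatAux, Char.toNat]

theorem pvStrLt_irrefl (l : List Char) : pvStrLt l l = false := by
  induction l with
  | nil => rfl
  | cons a as ih => simp [pvStrLt, ih]

theorem pvStrLt_set (l : List Char) (i : Nat) (c : Char) (h : i < l.length) :
    pvStrLt (l.set i c) l = true ↔ c < l.getD i default := by
  induction l generalizing i with
  | nil => simp at h
  | cons a as ih =>
    cases i with
    | zero =>
      show pvStrLt (c :: as) (a :: as) = true ↔ c < a
      rcases lt_trichotomy c a with hlt | heq | hgt
      · simp [pvStrLt, hlt]
      · subst heq; simp [pvStrLt, pvStrLt_irrefl]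
      · simp [pvStrLt, hgt, not_lt_of_gt hgt]
    | succ k =>
      show pvStrLt (a :: as.set k c) (a :: as) = true ↔ c < as.getD k default
      have := ih k (by simpa using h)
      simpa [pvStrLt] using this

theorem pvRep_eq_set (l : List Char) (i : Nat) (c : Char) (h : i < l.length) :
    pvRep l i c = l.set i c := by
  rw [pvRep, List.set_eq_take_cons_drop c h]; simp

theorem pvPal_iff (l : List Char) :
    l = l.reverse ↔ ∀ i < l.length, l.getD i default = l.getD (l.length - 1 - i) default := by
  constructor
  · intro h i hi
    rw [List.getD_eq_getElem _ _ hi,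
        List.getD_eq_getElem _ _ (show l.length - 1 - i < l.length by omega)]
    rw [List.getElem_of_eq h hi, List.getElem_reverse]
  · intro h
    apply List.ext_getElem (by simp)
    intro i h1 h2
    rw [List.getElem_reverse]
    have := h i (by omega)
    rw [List.getD_eq_getElem _ _ (by omega), List.getD_eq_getElem _ _ (by omega)] at this
    exact this

theorem pvGetD_set (l : List Char) (i k : Nat) (c : Char) (hk : k < l.length) :
    (l.set i c).getD k default = if i = k then c else l.getD k default := by
  rw [List.getD_eq_getElem _ _ (by simpa using hk), List.getElem_set]
  split
  · rfl
  · rw [List.getD_eq_getElem _ _ hk]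

theorem pvSet_pal_iff (l : List Char) (i : Nat) (c : Char) (h : i < l.length) :
    ((l.set i c) = (l.set i c).reverse) ↔
      ((∀ k < l.length, k ≠ i → l.length - 1 - k ≠ i →
          l.getD k default = l.getD (l.length - 1 - k) default) ∧
       (l.length - 1 - i ≠ i → c = l.getD (l.length - 1 - i) default)) := by
  rw [pvPal_iff]
  simp only [List.length_set]
  constructor
  · intro hp
    constructor
    · intro k hk hki hkm
      have := hp k hk
      rw [pvGetD_set _ _ _ _ hk, pvGetD_set _ _ _ _ (by omega),
          if_neg (by omega), if_neg (by omega)] at this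
      exact this
    · intro hne
      have := hp i h
      rw [pvGetD_set _ _ _ _ h, pvGetD_set _ _ _ _ (by omega),
          if_pos rfl, if_neg (by omega)] at this
      exact this
  · rintro ⟨h1, h2⟩ k hk
    rw [pvGetD_set _ _ _ _ hk, pvGetD_set _ _ _ _ (by omega)]
    by_cases hki : i = k
    · subst hki
      rw [if_pos rfl]
      by_cases hmid : l.length - 1 - i = i
      · rw [if_pos hmid.symm]
      · rw [if_neg (by omega)]; exact h2 hmid
    · rw [if_neg hki]
      by_cases hmi : i = l.length - 1 - k
      · rw [if_pos hmi]
        have hk' : k = l.length - 1 - i := by omega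
        have hc : c = l.getD k default := by rw [hk']; exact h2 (by omega)
        exact hc.symm
      · rw [if_neg hmi]
        exact h1 k hk (fun hh => hki hh.symm) (fun hh => hmi hh.symm)

theorem pvCond_iff (l : List Char) (i j : Nat) (h : i < l.length) (hv : j < 55296) :
    pvCond l i j = true ↔
      (j < (l.getD i default).toNat ∧
       (∀ k < l.length, k ≠ i → l.length - 1 - k ≠ i →
          l.getD k default = l.getD (l.length - 1 - k) default) ∧
       (l.length - 1 - i ≠ i → Char.ofNat j = l.getD (l.length - 1 - i) default)) := by
  simp only [pvCond, Bool.and_eq_true, beq_iff_eq]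
  rw [pvRep_eq_set l i _ h, pvStrLt_set l i _ h, pvSet_pal_iff l i _ h,
      pvCharLt, pvOfNat_toNat hv]

theorem pvInnerA_none (l : List Char) (i : Nat) (js : List Nat)
    (h : ∀ j ∈ js, pvCond l i j = false) : pvInnerA l i js = none := by
  induction js with
  | nil => rfl
  | cons j js ih =>
    rw [pvInnerA, if_neg (by simp [h j (List.mem_cons_self ..)])]
    exact ih fun j' hj' => h j' (List.mem_cons_of_mem _ hj')

theorem pvInnerA_hit (l : List Char) (i : Nat) (js : List Nat) (j₀ : Nat)
    (hmem : j₀ ∈ js) (hj : pvCond l i j₀ = true)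
    (huniq : ∀ j ∈ js, j ≠ j₀ → pvCond l i j = false) :
    pvInnerA l i js = some (pvRep l i (Char.ofNat j₀)) := by
  induction js with
  | nil => simp at hmem
  | cons j js ih =>
    by_cases hjj : j = j₀
    · subst hjj; rw [pvInnerA, if_pos hj]
    · rw [pvInnerA, if_neg (by simp [huniq j (List.mem_cons_self ..) hjj])]
      refine ih ?_ fun j' hj' hne => huniq j' (List.mem_cons_of_mem _ hj') hne
      rcases List.mem_cons.mp hmem with hh | hh
      · exact absurd hh.symm hjj
      · exact hh

theorem pvOuterPal_cons_none (l : List Char) (i : Nat) (is : List Nat)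
    (h : pvInnerA l i (List.range' 97 ((l.getD i default).toNat - 97)) = none) :
    pvOuterPal l (i :: is) = pvOuterPal l is := by
  show (match pvInnerA l i (List.range' 97 ((l.getD i default).toNat - 97)) with
        | some t => some t | none => pvOuterPal l is) = pvOuterPal l is
  rw [h]

theorem pvOuterPal_cons_some (l : List Char) (i : Nat) (is : List Nat) (t : List Char)
    (h : pvInnerA l i (List.range' 97 ((l.getD i default).toNat - 97)) = some t) :
    pvOuterPal l (i :: is) = some t := by
  show (match pvInnerA l i (List.range' 97 ((l.getD i default).toNat - 97)) with
        | some t => some t | none => pvOuterPal l is) = some t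
  rw [h]

theorem pvOuterNon_cons_none (l : List Char) (i : Nat) (is : List Nat)
    (h : pvInnerA l i (List.range' 97 26) = none) :
    pvOuterNon l (i :: is) = pvOuterNon l is := by
  show (match pvInnerA l i (List.range' 97 26) with
        | some t => some t | none => pvOuterNon l is) = pvOuterNon l is
  rw [h]

theorem pvOuterNon_cons_some (l : List Char) (i : Nat) (is : List Nat) (t : List Char)
    (h : pvInnerA l i (List.range' 97 26) = some t) :
    pvOuterNon l (i :: is) = some t := by
  show (match pvInnerA l i (List.range' 97 26) with
        | some t => some t | none => pvOuterNon l is) = some t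
  rw [h]

theorem pvOuterPal_none (l : List Char) (is : List Nat)
    (h : ∀ i ∈ is, pvInnerA l i (List.range' 97 ((l.getD i default).toNat - 97)) = none) :
    pvOuterPal l is = none := by
  induction is with
  | nil => rfl
  | cons i is ih =>
    rw [pvOuterPal_cons_none _ _ _ (h i (List.mem_cons_self ..))]
    exact ih fun i' hi' => h i' (List.mem_cons_of_mem _ hi')

theorem pvOuterPal_hit (l : List Char) (is : List Nat) (i₀ : Nat) (t : List Char)
    (hmem : i₀ ∈ is)
    (hi : pvInnerA l i₀ (List.range' 97 ((l.getD i₀ default).toNat - 97)) = some t)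
    (huniq : ∀ i ∈ is, i ≠ i₀ →
      pvInnerA l i (List.range' 97 ((l.getD i default).toNat - 97)) = none) :
    pvOuterPal l is = some t := by
  induction is with
  | nil => simp at hmem
  | cons i is ih =>
    by_cases hii : i = i₀
    · subst hii; exact pvOuterPal_cons_some _ _ _ _ hi
    · rw [pvOuterPal_cons_none _ _ _ (huniq i (List.mem_cons_self ..) hii)]
      refine ih ?_ fun i' hi' hne => huniq i' (List.mem_cons_of_mem _ hi') hne
      rcases List.mem_cons.mp hmem with hh | hh
      · exact absurd hh.symm hii
      · exact hh

theorem pvOuterNon_none (l : List Char) (is : List Nat)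
    (h : ∀ i ∈ is, pvInnerA l i (List.range' 97 26) = none) :
    pvOuterNon l is = none := by
  induction is with
  | nil => rfl
  | cons i is ih =>
    rw [pvOuterNon_cons_none _ _ _ (h i (List.mem_cons_self ..))]
    exact ih fun i' hi' => h i' (List.mem_cons_of_mem _ hi')

theorem pvOuterNon_hit (l : List Char) (is : List Nat) (i₀ : Nat) (t : List Char)
    (hmem : i₀ ∈ is)
    (hi : pvInnerA l i₀ (List.range' 97 26) = some t)
    (huniq : ∀ i ∈ is, i ≠ i₀ → pvInnerA l i (List.range' 97 26) = none) :
    pvOuterNon l is = some t := by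
  induction is with
  | nil => simp at hmem
  | cons i is ih =>
    by_cases hii : i = i₀
    · subst hii; exact pvOuterNon_cons_some _ _ _ _ hi
    · rw [pvOuterNon_cons_none _ _ _ (huniq i (List.mem_cons_self ..) hii)]
      refine ih ?_ fun i' hi' hne => huniq i' (List.mem_cons_of_mem _ hi') hne
      rcases List.mem_cons.mp hmem with hh | hh
      · exact absurd hh.symm hii
      · exact hh

-- mirror symmetry: agreement on the lower half, away from an excluded index, extends everywhere
theorem pvHalf_ex (l : List Char) (p : Nat)
    (hp : ∀ i < l.length / 2, i ≠ p → l.getD i default = l.getD (l.length - 1 - i) default) :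
    ∀ k < l.length, k ≠ p → l.length - 1 - k ≠ p →
      l.getD k default = l.getD (l.length - 1 - k) default := by
  intro k hk hkp hkq
  by_cases hlow : k < l.length / 2
  · exact hp k hlow hkp
  · by_cases hhigh : l.length - 1 - k < l.length / 2
    · have := hp (l.length - 1 - k) hhigh hkq
      have hkk : l.length - 1 - (l.length - 1 - k) = k := by omega
      rw [hkk] at this; exact this.symm
    · have hmid : k = l.length - 1 - k := by omega
      rw [← hmid]

theorem pvMem_mism (l : List Char) (i : Nat) :
    i ∈ (List.range (l.length / 2)).filter
        (fun i => !(l.getD i default == l.getD (l.length - 1 - i) default)) ↔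
      i < l.length / 2 ∧ l.getD i default ≠ l.getD (l.length - 1 - i) default := by
  simp [List.mem_filter]

theorem pvInnerPal_none (l : List Char)
    (hD : ∀ i < l.length, (l.getD i default).toNat ≤ 126)
    (hfull : ∀ i < l.length, l.getD i default = l.getD (l.length - 1 - i) default)
    (i : Nat) (hi : i < l.length) (hne2 : l.length - 1 - i ≠ i) :
    pvInnerA l i (List.range' 97 ((l.getD i default).toNat - 97)) = none := by
  apply pvInnerA_none
  intro j hj
  have hjr := List.mem_range'_1.mp hj
  have hjlt : j < (l.getD i default).toNat := by omega
  have hv : j < 55296 := by have := hD i hi; omega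
  by_contra hc
  rw [Bool.not_eq_false] at hc
  have hC := (pvCond_iff l i j hi hv).mp hc
  have h3 := hC.2.2 hne2
  have h4 : l.getD (l.length - 1 - i) default = l.getD i default := (hfull i hi).symm
  have h5 := congrArg Char.toNat (h3.trans h4)
  rw [pvOfNat_toNat hv] at h5
  omega

theorem pvMainPal (s : String)
    (hD : ∀ i < s.toList.length, (s.toList.getD i default).toNat ≤ 126)
    (hpal : s.toList = s.toList.reverse) :
    modify_palindrome s = modify_palindrome_alt s := by
  simp only [modify_palindrome, modify_palindrome_alt]
  rw [if_pos (show (s.toList == s.toList.reverse) = true from beq_iff_eq.mpr hpal)]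
  have hfull := (pvPal_iff s.toList).mp hpal
  have hmism : (List.range (s.toList.length / 2)).filter
      (fun i => !(s.toList.getD i default == s.toList.getD (s.toList.length - 1 - i) default)) = [] := by
    apply List.filter_eq_nil_iff.mpr
    intro i hi
    have hi2 : i < s.toList.length := by have := List.mem_range.mp hi; omega
    rw [hfull i hi2]
    simp
  rw [hmism]
  by_cases hodd : s.toList.length % 2 = 1 ∧ 'a' < s.toList.getD (s.toList.length / 2) default
  · rw [if_pos hodd]
    have hm : s.toList.length / 2 < s.toList.length := by omega
    have htoNat : 97 < (s.toList.getD (s.toList.length / 2) default).toNat := by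
      have := (pvCharLt 'a' _).mp hodd.2
      simpa using this
    have hmid : s.toList.length - 1 - s.toList.length / 2 = s.toList.length / 2 := by omega
    have hcond : pvCond s.toList (s.toList.length / 2) 97 = true := by
      refine (pvCond_iff s.toList _ 97 hm (by norm_num)).mpr
        ⟨htoNat, fun k hk _ _ => hfull k hk, fun hne => absurd hmid hne⟩
    have hinner : pvInnerA s.toList (s.toList.length / 2)
        (List.range' 97 ((s.toList.getD (s.toList.length / 2) default).toNat - 97)) =
        some (pvRep s.toList (s.toList.length / 2) (Char.ofNat 97)) := by
      have hsplit : (s.toList.getD (s.toList.length / 2) default).toNat - 97 =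
          ((s.toList.getD (s.toList.length / 2) default).toNat - 98) + 1 := by omega
      rw [hsplit, List.range'_succ, pvInnerA, if_pos hcond]
    have houter := pvOuterPal_hit s.toList (List.range s.toList.length) (s.toList.length / 2)
      _ (List.mem_range.mpr hm) hinner
      (fun i hi hne => pvInnerPal_none s.toList hD hfull i (List.mem_range.mp hi) (by
        have := List.mem_range.mp hi; omega))
    rw [houter]
    rfl
  · rw [if_neg hodd]
    have houter : pvOuterPal s.toList (List.range s.toList.length) = none := by
      apply pvOuterPal_none
      intro i hi
      have hi' := List.mem_range.mp hi
      by_cases hmidi : s.toList.length - 1 - i = i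
      · have hieq : i = s.toList.length / 2 := by omega
        have hnodd : s.toList.length % 2 = 1 := by omega
        have hna : ¬ 'a' < s.toList.getD (s.toList.length / 2) default :=
          fun hlt => hodd ⟨hnodd, hlt⟩
        have hz : (s.toList.getD i default).toNat - 97 = 0 := by
          rw [hieq]
          have h8 := (pvCharLt 'a' (s.toList.getD (s.toList.length / 2) default)).not.mp hna
          simp only [not_lt] at h8
          have h9 := (pvCharLe _ 'a').mp h8
          have h10 : ('a' : Char).toNat = 97 := rfl
          omega
        rw [hz]
        rfl
      · exact pvInnerPal_none s.toList hD hfull i hi' hmidi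
    rw [houter]

-- the [p]-arm of modify_palindrome_alt's match, as a standalone definition (proof convenience)
def pvAltPair (l : List Char) (p : Nat) : String :=
  if l.getD (l.length - 1 - p) default < l.getD p default ∧
      'a' ≤ l.getD (l.length - 1 - p) default ∧ l.getD (l.length - 1 - p) default ≤ 'z' then
    String.mk (l.take p ++ [l.getD (l.length - 1 - p) default] ++ l.drop (p + 1))
  else
    if l.getD p default < l.getD (l.length - 1 - p) default ∧
        'a' ≤ l.getD p default ∧ l.getD p default ≤ 'z' then
      String.mk (l.take (l.length - 1 - p) ++ [l.getD p default] ++ l.drop (l.length - 1 - p + 1))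
    else ""

theorem pvMainNon (s : String)
    (hpal : ¬ s.toList = s.toList.reverse) :
    modify_palindrome s = modify_palindrome_alt s := by
  simp only [modify_palindrome, modify_palindrome_alt]
  rw [if_neg (show ¬ (s.toList == s.toList.reverse) = true by simpa using hpal)]
  rcases hm : (List.range (s.toList.length / 2)).filter
      (fun i => !(s.toList.getD i default == s.toList.getD (s.toList.length - 1 - i) default)) with
    _ | ⟨p, _ | ⟨y, rest⟩⟩
  · exfalso
    apply hpal
    apply (pvPal_iff s.toList).mpr
    have hhalf : ∀ i < s.toList.length / 2, i ≠ s.toList.length →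
        s.toList.getD i default = s.toList.getD (s.toList.length - 1 - i) default := by
      intro i hi _
      have := List.filter_eq_nil_iff.mp hm i (List.mem_range.mpr hi)
      simpa using this
    intro k hk
    exact pvHalf_ex s.toList s.toList.length hhalf k hk (by omega) (by omega)
  · -- exactly one mismatched mirror pair (p, n-1-p)
    have hpmem : p ∈ (List.range (s.toList.length / 2)).filter
        (fun i => !(s.toList.getD i default == s.toList.getD (s.toList.length - 1 - i) default)) := by
      rw [hm]; exact List.mem_cons_self ..
    have hp2 := (pvMem_mism s.toList p).mp hpmem
    have hplt : p < s.toList.length := by omega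
    have hqlt : s.toList.length - 1 - p < s.toList.length := by omega
    have hpq : p < s.toList.length - 1 - p := by omega
    have huniq' : ∀ i < s.toList.length / 2, i ≠ p →
        s.toList.getD i default = s.toList.getD (s.toList.length - 1 - i) default := by
      intro i hi hne
      by_contra hc
      have h1 := (pvMem_mism s.toList i).mpr ⟨hi, hc⟩
      rw [hm] at h1
      simp only [List.mem_singleton] at h1
      exact hne h1
    have hpairs := pvHalf_ex s.toList p huniq'
    have hpairsq : ∀ k < s.toList.length, k ≠ s.toList.length - 1 - p →
        s.toList.length - 1 - k ≠ s.toList.length - 1 - p →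
        s.toList.getD k default = s.toList.getD (s.toList.length - 1 - k) default := by
      intro k hk h1 h2
      exact hpairs k hk (by omega) (by omega)
    have hcondP : ∀ j, 97 ≤ j → j < 123 →
        (pvCond s.toList p j = true ↔
          (j = (s.toList.getD (s.toList.length - 1 - p) default).toNat ∧
           (s.toList.getD (s.toList.length - 1 - p) default).toNat <
             (s.toList.getD p default).toNat)) := by
      intro j h1 h2
      rw [pvCond_iff s.toList p j hplt (by omega)]
      constructor
      · rintro ⟨hjlt, -, hmir⟩
        have h3 := hmir (by omega)
        have h4 := congrArg Char.toNat h3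
        rw [pvOfNat_toNat (by omega)] at h4
        exact ⟨h4, by omega⟩
      · rintro ⟨hje, hlt⟩
        refine ⟨by omega, hpairs, fun _ => ?_⟩
        exact pvCharEq (by rw [pvOfNat_toNat (by omega), hje])
    have hcondQ : ∀ j, 97 ≤ j → j < 123 →
        (pvCond s.toList (s.toList.length - 1 - p) j = true ↔
          (j = (s.toList.getD p default).toNat ∧
           (s.toList.getD p default).toNat <
             (s.toList.getD (s.toList.length - 1 - p) default).toNat)) := by
      intro j h1 h2
      rw [pvCond_iff s.toList _ j hqlt (by omega)]
      have hqq : s.toList.length - 1 - (s.toList.length - 1 - p) = p := by omega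
      rw [hqq]
      constructor
      · rintro ⟨hjlt, -, hmir⟩
        have h3 := hmir (by omega)
        have h4 := congrArg Char.toNat h3
        rw [pvOfNat_toNat (by omega)] at h4
        exact ⟨h4, by omega⟩
      · rintro ⟨hje, hlt⟩
        refine ⟨by omega, hpairsq, fun _ => ?_⟩
        exact pvCharEq (by rw [pvOfNat_toNat (by omega), hje])
    have hOther : ∀ i < s.toList.length, i ≠ p → i ≠ s.toList.length - 1 - p →
        pvInnerA s.toList i (List.range' 97 26) = none := by
      intro i hi h1 h2
      apply pvInnerA_none
      intro j hj
      have hjr := List.mem_range'_1.mp hj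
      by_contra hc
      rw [Bool.not_eq_false] at hc
      have hC := (pvCond_iff s.toList i j hi (by omega)).mp hc
      exact hp2.2 (hC.2.1 p (by omega) (by omega) (by omega))
    have ha97 : ('a' : Char).toNat = 97 := rfl
    have hz122 : ('z' : Char).toNat = 122 := rfl
    change _ = pvAltPair s.toList p
    rw [pvAltPair]
    by_cases hb1 : s.toList.getD (s.toList.length - 1 - p) default < s.toList.getD p default ∧
        'a' ≤ s.toList.getD (s.toList.length - 1 - p) default ∧
        s.toList.getD (s.toList.length - 1 - p) default ≤ 'z'
    · rw [if_pos hb1]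
      have hn1 := (pvCharLt _ _).mp hb1.1
      have hn2 := (pvCharLe _ _).mp hb1.2.1
      have hn3 := (pvCharLe _ _).mp hb1.2.2
      rw [ha97] at hn2
      rw [hz122] at hn3
      have hinnerP : pvInnerA s.toList p (List.range' 97 26) =
          some (pvRep s.toList p
            (Char.ofNat (s.toList.getD (s.toList.length - 1 - p) default).toNat)) := by
        refine pvInnerA_hit s.toList p _ _ (List.mem_range'_1.mpr ⟨hn2, by omega⟩)
          ((hcondP _ hn2 (by omega)).mpr ⟨rfl, hn1⟩) ?_
        intro j hj hne
        have hjr := List.mem_range'_1.mp hj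
        by_contra hc
        rw [Bool.not_eq_false] at hc
        exact hne ((hcondP j (by omega) (by omega)).mp hc).1
      have hinnerQ : pvInnerA s.toList (s.toList.length - 1 - p) (List.range' 97 26) = none := by
        apply pvInnerA_none
        intro j hj
        have hjr := List.mem_range'_1.mp hj
        by_contra hc
        rw [Bool.not_eq_false] at hc
        have := ((hcondQ j (by omega) (by omega)).mp hc).2
        omega
      have houter := pvOuterNon_hit s.toList (List.range s.toList.length) p _
        (List.mem_range.mpr hplt) hinnerP (fun i hi hne => by
          by_cases hiq : i = s.toList.length - 1 - p
          · rw [hiq]; exact hinnerQ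
          · exact hOther i (List.mem_range.mp hi) hne hiq)
      rw [houter,
        show Char.ofNat (s.toList.getD (s.toList.length - 1 - p) default).toNat =
            s.toList.getD (s.toList.length - 1 - p) default from
          pvCharEq (pvOfNat_toNat (by omega))]
      rfl
    · rw [if_neg hb1]
      by_cases hb2 : s.toList.getD p default < s.toList.getD (s.toList.length - 1 - p) default ∧
          'a' ≤ s.toList.getD p default ∧ s.toList.getD p default ≤ 'z'
      · rw [if_pos hb2]
        have hn1 := (pvCharLt _ _).mp hb2.1
        have hn2 := (pvCharLe _ _).mp hb2.2.1
        have hn3 := (pvCharLe _ _).mp hb2.2.2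
        rw [ha97] at hn2
        rw [hz122] at hn3
        have hinnerP : pvInnerA s.toList p (List.range' 97 26) = none := by
          apply pvInnerA_none
          intro j hj
          have hjr := List.mem_range'_1.mp hj
          by_contra hc
          rw [Bool.not_eq_false] at hc
          have := ((hcondP j (by omega) (by omega)).mp hc).2
          omega
        have hinnerQ : pvInnerA s.toList (s.toList.length - 1 - p) (List.range' 97 26) =
            some (pvRep s.toList (s.toList.length - 1 - p)
              (Char.ofNat (s.toList.getD p default).toNat)) := by
          refine pvInnerA_hit s.toList _ _ _ (List.mem_range'_1.mpr ⟨hn2, by omega⟩)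
            ((hcondQ _ hn2 (by omega)).mpr ⟨rfl, hn1⟩) ?_
          intro j hj hne
          have hjr := List.mem_range'_1.mp hj
          by_contra hc
          rw [Bool.not_eq_false] at hc
          exact hne ((hcondQ j (by omega) (by omega)).mp hc).1
        have houter := pvOuterNon_hit s.toList (List.range s.toList.length)
          (s.toList.length - 1 - p) _ (List.mem_range.mpr hqlt) hinnerQ (fun i hi hne => by
            by_cases hip : i = p
            · rw [hip]; exact hinnerP
            · exact hOther i (List.mem_range.mp hi) hip hne)
        rw [houter,
          show Char.ofNat (s.toList.getD p default).toNat = s.toList.getD p default from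
            pvCharEq (pvOfNat_toNat (by omega))]
        rfl
      · rw [if_neg hb2]
        have houter : pvOuterNon s.toList (List.range s.toList.length) = none := by
          apply pvOuterNon_none
          intro i hi
          by_cases hip : i = p
          · subst hip
            apply pvInnerA_none
            intro j hj
            have hjr := List.mem_range'_1.mp hj
            by_contra hc
            rw [Bool.not_eq_false] at hc
            have hC := (hcondP j (by omega) (by omega)).mp hc
            apply hb1
            refine ⟨(pvCharLt _ _).mpr (by omega), (pvCharLe _ _).mpr (by rw [ha97]; omega),
              (pvCharLe _ _).mpr (by rw [hz122]; omega)⟩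
          · by_cases hiq : i = s.toList.length - 1 - p
            · subst hiq
              apply pvInnerA_none
              intro j hj
              have hjr := List.mem_range'_1.mp hj
              by_contra hc
              rw [Bool.not_eq_false] at hc
              have hC := (hcondQ j (by omega) (by omega)).mp hc
              apply hb2
              refine ⟨(pvCharLt _ _).mpr (by omega), (pvCharLe _ _).mpr (by rw [ha97]; omega),
                (pvCharLe _ _).mpr (by rw [hz122]; omega)⟩
            · exact hOther i (List.mem_range.mp hi) hip hiq
        rw [houter]
  · -- at least two mismatched mirror pairs: no single edit can give a palindrome
    have hpmem : p ∈ (List.range (s.toList.length / 2)).filter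
        (fun i => !(s.toList.getD i default == s.toList.getD (s.toList.length - 1 - i) default)) := by
      rw [hm]; exact List.mem_cons_self ..
    have hymem : y ∈ (List.range (s.toList.length / 2)).filter
        (fun i => !(s.toList.getD i default == s.toList.getD (s.toList.length - 1 - i) default)) := by
      rw [hm]; simp
    have hp2 := (pvMem_mism s.toList p).mp hpmem
    have hy2 := (pvMem_mism s.toList y).mp hymem
    have hnodup : (p :: y :: rest).Nodup := by
      rw [← hm]
      exact List.Nodup.filter _ (List.nodup_range)
    have hpy : p ≠ y := by
      have := (List.nodup_cons.mp hnodup).1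
      intro h
      exact this (h ▸ List.mem_cons_self ..)
    have houter : pvOuterNon s.toList (List.range s.toList.length) = none := by
      apply pvOuterNon_none
      intro i hi
      apply pvInnerA_none
      intro j hj
      have hjr := List.mem_range'_1.mp hj
      have hi' := List.mem_range.mp hi
      by_contra hc
      rw [Bool.not_eq_false] at hc
      have hC := (pvCond_iff s.toList i j hi' (by omega)).mp hc
      have hP : p = i ∨ s.toList.length - 1 - p = i := by
        by_contra hcc
        rw [not_or] at hcc
        exact hp2.2 (hC.2.1 p (by omega) hcc.1 hcc.2)
      have hY : y = i ∨ s.toList.length - 1 - y = i := by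
        by_contra hcc
        rw [not_or] at hcc
        exact hy2.2 (hC.2.1 y (by omega) hcc.1 hcc.2)
      rcases hP with h | h <;> rcases hY with h' | h' <;> omega
    rw [houter]

theorem pvMain (s : String) (hd : Dom_modify_palindrome s) :
    modify_palindrome s = modify_palindrome_alt s := by
  have hD : ∀ i < s.toList.length, (s.toList.getD i default).toNat ≤ 126 := by
    intro i hi
    have hmem : s.toList.getD i default ∈ s.toList := by
      rw [List.getD_eq_getElem _ _ hi]; exact List.getElem_mem hi
    unfold Dom_modify_palindrome pvDomStr at hd
    have h2 := List.all_eq_true.mp hd _ hmem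
    unfold pvDomChar at h2
    simp only [Bool.or_eq_true, Bool.and_eq_true, decide_eq_true_eq, beq_iff_eq] at h2
    omega
  by_cases hpal : s.toList = s.toList.reverse
  · exact pvMainPal s hD hpal
  · exact pvMainNon s hpal

-- ===== VERDICT (by name: the statement is the Claim_ definition above) =====
theorem modify_palindrome_spec : Claim_equal_modify_palindrome := by
  intro s hd
  unfold Spec_modify_palindrome
  exact pvMain s hd
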